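-- pv_equiv track=rewrite | github.com/jiwonsudo/Inyro-Algorithm-Study | 2nd-week-greedy/adventurer_guild.py | solve
-- ===== SOURCE A (Python) =====
-- def solve(N, list_of_fear):
--   list_of_fear.sort()
--   res = 0
--   acc = 0 # accumulator
--   for member_fear in list_of_fear:
--     acc += 1 # add 1 member first
--     if acc >= member_fear:
--       res += 1
--       acc = 0
--   return res
-- ===== SOURCE B (Python) =====
-- def solve(N, list_of_fear):
--     counts = {}
--     for f in list_of_fear:
--         counts[f] = counts.get(f, 0) + 1
--     res = 0
--     acc = 0
--     for v in sorted(counts):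
--         c = counts[v]
--         w = max(v, 1)
--         need = max(v - acc, 1)
--         if c < need:
--             acc += c
--         else:
--             res += 1 + (c - need) // w
--             acc = (c - need) % w
--     return res
-- ===== Notes on version B (the rewrite author's own statement) =====
-- stated objective: alternative
-- what changed: Replaces the sorted per-element greedy loop by a frequency dictionary plus one arithmetic pass over the sorted distinct fear values, closing whole batches of groups per run with a division/modulus formula instead of iterating member by member.
import Mathlib
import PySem

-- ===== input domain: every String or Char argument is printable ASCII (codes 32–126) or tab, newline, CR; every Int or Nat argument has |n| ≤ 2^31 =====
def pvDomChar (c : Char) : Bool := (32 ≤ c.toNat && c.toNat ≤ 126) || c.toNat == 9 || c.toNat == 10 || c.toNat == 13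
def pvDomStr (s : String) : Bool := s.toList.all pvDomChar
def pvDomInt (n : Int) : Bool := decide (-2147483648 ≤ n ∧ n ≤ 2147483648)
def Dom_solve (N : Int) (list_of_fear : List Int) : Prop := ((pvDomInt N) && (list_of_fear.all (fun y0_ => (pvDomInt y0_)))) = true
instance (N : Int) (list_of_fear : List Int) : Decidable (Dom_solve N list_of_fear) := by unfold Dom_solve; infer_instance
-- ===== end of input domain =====

-- B replaces A's per-element greedy over the sorted list by a frequency dictionary plus one
-- arithmetic pass over the sorted distinct fear values (objective: alternative algorithm).
-- Note: A sorts list_of_fear IN PLACE (observable mutation); B does not mutate its argument.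
-- The equivalence proved here is about the RETURN value only.

-- ===== PORT A =====
def solve (N : Int) (list_of_fear : List Int) : Int :=
  -- list_of_fear.sort(); then per-element greedy with (res, acc)
  ((PySem.List.sorted list_of_fear (fun x => x) false).foldl
    (fun (s : Int × Int) member_fear =>
      let acc := s.2 + 1
      if acc ≥ member_fear then (s.1 + 1, 0) else (s.1, acc))
    (0, 0)).1

-- ===== PORT B =====
def solve_alt (N : Int) (list_of_fear : List Int) : Int :=
  -- counts = {}; for f in list_of_fear: counts[f] = counts.get(f, 0) + 1
  let counts : PySem.Dict Int Int :=
    list_of_fear.foldl (fun d f => d.insert f (d.getD f 0 + 1)) PySem.Dict.empty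
  -- for v in sorted(counts): run-length greedy step
  ((PySem.List.sorted counts.keys (fun x => x) false).foldl
    (fun (s : Int × Int) v =>
      let c := counts.getD v 0
      let w := max v 1
      let need := max (v - s.2) 1
      if c < need then (s.1, s.2 + c)
      else (s.1 + 1 + PySem.Int.floordiv (c - need) w, PySem.Int.mod (c - need) w))
    (0, 0)).1

-- ===== PRECONDITION & SPEC =====
def Spec_solve (N : Int) (list_of_fear : List Int) (out : Int) : Prop := out = solve_alt N list_of_fear
instance (N : Int) (list_of_fear : List Int) (out : Int) : Decidable (Spec_solve N list_of_fear out) := by unfold Spec_solve; infer_instance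

-- ===== CLAIM (what is proved, stated in full; the proofs are below) =====
def Claim_equal_solve : Prop := ∀ (N : Int) (list_of_fear : List Int), Dom_solve N list_of_fear → Spec_solve N list_of_fear (solve N list_of_fear)

-- ===== LEMMAS AND PROOFS =====

def pvStepA (s : Int × Int) (f : Int) : Int × Int :=
  let acc := s.2 + 1
  if acc ≥ f then (s.1 + 1, 0) else (s.1, acc)

def pvStepB (c : Int) (s : Int × Int) (v : Int) : Int × Int :=
  let w := max v 1
  let need := max (v - s.2) 1
  if c < need then (s.1, s.2 + c)
  else (s.1 + 1 + PySem.Int.floordiv (c - need) w, PySem.Int.mod (c - need) w)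

theorem pvRun (v : Int) (n : Nat) : ∀ (r a : Int), 0 ≤ a →
    (List.replicate n v).foldl pvStepA (r, a) = pvStepB (n : Int) (r, a) v := by
  induction n with
  | zero =>
    intro r a ha
    simp [pvStepB]
  | succ n ih =>
    intro r a ha
    rw [List.replicate_succ, List.foldl_cons]
    by_cases hcl : a + 1 ≥ v
    · have h1 : pvStepA (r, a) v = (r + 1, 0) := by simp [pvStepA, hcl]
      rw [h1, ih (r+1) 0 le_rfl]
      -- show pvStepB (n+1) (r,a) v = pvStepB n (r+1,0) v
      have hw : (0:Int) < max v 1 := by omega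
      have hneed : max (v - a) 1 = 1 := by omega
      simp only [pvStepB, hneed, Nat.cast_succ]
      have hneed0 : max (v - 0) 1 = max v 1 := by omega
      rw [hneed0]
      by_cases hsm : (n : Int) < max v 1
      · have h2 : ¬ ((n:Int) + 1 < 1) := by omega
        rw [if_neg h2, if_pos hsm]
        have hn0 : (0:Int) ≤ n := Int.natCast_nonneg n
        rw [PySem.Int.floordiv_eq_ediv_of_pos hw, PySem.Int.mod_eq_emod_of_pos hw]
        have : (n:Int) + 1 - 1 = (n:Int) := by ring
        rw [this, Int.ediv_eq_zero_of_lt hn0 hsm, Int.emod_eq_of_lt hn0 hsm]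
        simp
      · have h2 : ¬ ((n:Int) + 1 < 1) := by omega
        rw [if_neg h2, if_neg hsm]
        simp only [Prod.mk.injEq]
        rw [PySem.Int.floordiv_eq_ediv_of_pos hw, PySem.Int.mod_eq_emod_of_pos hw,
            PySem.Int.floordiv_eq_ediv_of_pos hw, PySem.Int.mod_eq_emod_of_pos hw]
        have he : (n:Int) + 1 - 1 = ((n:Int) - max v 1) + max v 1 * 1 := by ring
        rw [he, Int.add_mul_ediv_left _ _ (by omega : max v 1 ≠ 0), Int.add_mul_emod_self_left]
        constructor <;> ring
    · have h1 : pvStepA (r, a) v = (r, a + 1) := by simp [pvStepA, hcl]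
      rw [h1, ih r (a+1) (by omega)]
      have hneed : max (v - a) 1 = v - a := by omega
      have hneed' : max (v - (a+1)) 1 = v - a - 1 := by omega
      simp only [pvStepB, hneed, hneed', Nat.cast_succ]
      by_cases hsm : (n : Int) < v - a - 1
      · rw [if_pos (by omega : (n:Int) + 1 < v - a), if_pos hsm]
        simp only [Prod.mk.injEq, true_and]
        omega
      · rw [if_neg (by omega : ¬ ((n:Int) + 1 < v - a)), if_neg hsm]
        have : (n:Int) + 1 - (v - a) = (n:Int) - (v - a - 1) := by ring
        rw [this]

theorem pvStepB_nonneg (c v r a : Int) (hc : 0 ≤ c) (ha : 0 ≤ a) :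
    0 ≤ (pvStepB c (r, a) v).2 := by
  simp only [pvStepB]
  by_cases h : c < max (v - a) 1
  · simp only [h, if_true]; omega
  · simp only [h, if_false]
    exact PySem.Int.mod_nonneg _ (by omega : (0:Int) < max v 1)

theorem pvLoop (cnt : Int → Nat) (ks : List Int) : ∀ (r a : Int), 0 ≤ a →
    (ks.flatMap (fun v => List.replicate (cnt v) v)).foldl pvStepA (r, a)
      = ks.foldl (fun s v => pvStepB ((cnt v : Int)) s v) (r, a) := by
  induction ks with
  | nil => intro r a ha; simp
  | cons v ks ih =>
    intro r a ha
    rw [List.flatMap_cons, List.foldl_append, pvRun v (cnt v) r a ha, List.foldl_cons]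
    have h2 := pvStepB_nonneg ((cnt v : Int)) v r a (Int.natCast_nonneg _) ha
    rw [show pvStepB ((cnt v : Int)) (r, a) v
          = ((pvStepB ((cnt v : Int)) (r, a) v).1, (pvStepB ((cnt v : Int)) (r, a) v).2) from rfl]
    exact ih _ _ h2

theorem pvCountFlat (xs : List Int) (ks : List Int) (hnd : ks.Nodup) (x : Int) :
    (ks.flatMap (fun v => List.replicate (xs.count v) v)).count x
      = if x ∈ ks then xs.count x else 0 := by
  induction ks with
  | nil => simp
  | cons v ks ih =>
    rw [List.flatMap_cons, List.count_append, List.count_replicate,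
        ih (List.Nodup.of_cons hnd)]
    by_cases hx : x = v
    · subst hx
      have : x ∉ ks := (List.nodup_cons.mp hnd).1
      simp [this]
    · simp [hx, List.mem_cons]
      intro h; exact absurd h.symm hx

theorem pvFlatPairwise (cnt : Int → Nat) (ks : List Int) (h : ks.Pairwise (· < ·)) :
    (ks.flatMap (fun v => List.replicate (cnt v) v)).Pairwise (· ≤ ·) := by
  induction ks with
  | nil => simp
  | cons v ks ih =>
    rw [List.flatMap_cons]
    rw [List.pairwise_append]
    refine ⟨List.pairwise_replicate.mpr (Or.inr le_rfl), ih (List.Pairwise.of_cons h), ?_⟩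
    intro x hx y hy
    have hxv : x = v := (List.eq_of_mem_replicate hx)
    obtain ⟨u, hu, hyu⟩ := List.mem_flatMap.mp hy
    have hyu' : y = u := List.eq_of_mem_replicate hyu
    have := (List.pairwise_cons.mp h).1 u hu
    omega

theorem pvSortedFlat (xs : List Int) :
    PySem.List.sorted xs (fun x => x) false
      = (PySem.List.sorted (PySem.Set.ofList xs) (fun x => x) false).flatMap
          (fun v => List.replicate (xs.count v) v) := by
  have hpl : (PySem.List.sorted (PySem.Set.ofList xs) (fun x => x) false).Pairwise (· < ·) :=
    PySem.List.sorted_ofList_pairwise_lt xs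
  have hnd : (PySem.List.sorted (PySem.Set.ofList xs) (fun x => x) false).Nodup :=
    List.Pairwise.imp (fun h => ne_of_lt h) hpl
  have hperm : ((PySem.List.sorted (PySem.Set.ofList xs) (fun x => x) false).flatMap
      (fun v => List.replicate (xs.count v) v)).Perm xs := by
    rw [List.perm_iff_count]
    intro a
    rw [pvCountFlat xs _ hnd a]
    by_cases ha : a ∈ xs
    · have : a ∈ PySem.List.sorted (PySem.Set.ofList xs) (fun x => x) false := by
        rw [PySem.List.mem_sorted]
        exact (PySem.Set.mem_ofList xs a).mpr ha
      simp [this]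
    · have : a ∉ PySem.List.sorted (PySem.Set.ofList xs) (fun x => x) false := by
        rw [PySem.List.mem_sorted]
        intro hc; exact ha ((PySem.Set.mem_ofList xs a).mp hc)
      simp [this, List.count_eq_zero_of_not_mem ha]
  exact PySem.List.sorted_id_eq_of_perm_of_pairwise _ _ hperm
    (pvFlatPairwise (fun v => xs.count v) _ hpl)

-- ===== VERDICT (by name: the statement is the Claim_ definition above) =====
theorem solve_spec : Claim_equal_solve := by
  intro N xs _
  unfold Spec_solve solve solve_alt
  simp only [PySem.Dict.foldl_insert_getD_add_one_eq_counter, PySem.Dict.getD_counter,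
    PySem.Dict.keys_counter]
  rw [pvSortedFlat xs]
  rw [show (fun (s : Int × Int) member_fear =>
      let acc := s.2 + 1
      if acc ≥ member_fear then (s.1 + 1, 0) else (s.1, acc)) = pvStepA from rfl]
  rw [pvLoop (fun v => xs.count v) _ 0 0 le_rfl]
  rfl
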